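-- pv_equiv track=rewrite | github.com/terry-yes/programming_study | 03algorithm_problems/004우테코/1-3.py | solution
-- ===== SOURCE A (Python) =====
-- def solution(data):
-- 	result = ""
-- 	for i in data:
-- 		if i >= 'A' and i <= 'Z':
-- 			result += chr(ord('A') + ord('Z') - ord(i))
-- 		elif i >= 'a' and i <= 'z':
-- 			result += chr(ord('a') + ord('z') - ord(i))
-- 		else:
-- 			result += i
-- 	return result
-- ===== SOURCE B (Python) =====
-- _PAIRS = [(chr(65 + k), chr(90 - k)) for k in range(13)] + \
--          [(chr(97 + k), chr(122 - k)) for k in range(13)]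
--
-- def solution(data):
--     # Atbash is an involution made of 26 disjoint transpositions; apply each
--     # transposition to the whole string with three str.replace passes
--     # (a placeholder mediates the swap).
--     for x, y in _PAIRS:
--         data = data.replace(x, "\x00").replace(y, x).replace("\x00", y)
--     return data
-- ===== Notes on version B (the rewrite author's own statement) =====
-- stated objective: alternative
-- what changed: Instead of A's per-character if/elif arithmetic loop, B exploits that Atbash is 26 disjoint letter transpositions and applies each swap to the whole string with three str.replace passes (via a placeholder), never branching per character itself.
import Mathlib
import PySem

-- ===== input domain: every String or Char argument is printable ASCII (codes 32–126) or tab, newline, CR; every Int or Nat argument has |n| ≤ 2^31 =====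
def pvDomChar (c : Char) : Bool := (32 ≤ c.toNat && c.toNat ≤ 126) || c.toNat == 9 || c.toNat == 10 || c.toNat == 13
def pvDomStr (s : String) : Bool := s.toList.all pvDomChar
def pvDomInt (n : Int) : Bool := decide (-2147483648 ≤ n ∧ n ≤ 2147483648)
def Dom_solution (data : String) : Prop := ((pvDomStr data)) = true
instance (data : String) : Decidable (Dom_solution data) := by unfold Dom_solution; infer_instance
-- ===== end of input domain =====

-- B replaces A's per-character if/elif arithmetic loop by 26 whole-string transposition
-- passes (each a placeholder-mediated pair of str.replace calls); alternative; measured faster by constant factor (C-level replace passes).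

-- ===== PORT A =====
def solution (data : String) : String :=
  data.toList.foldl (fun result i =>
    if 'A' ≤ i ∧ i ≤ 'Z' then result.push (Char.ofNat ('A'.toNat + 'Z'.toNat - i.toNat))
    else if 'a' ≤ i ∧ i ≤ 'z' then result.push (Char.ofNat ('a'.toNat + 'z'.toNat - i.toNat))
    else result.push i) ""

-- ===== PORT B =====
-- _PAIRS = [(chr(65+k), chr(90-k)) for k in range(13)] + [(chr(97+k), chr(122-k)) for k in range(13)]
def pvPairs : List (Char × Char) :=
  (List.range 13).map (fun k => (Char.ofNat (65 + k), Char.ofNat (90 - k))) ++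
  (List.range 13).map (fun k => (Char.ofNat (97 + k), Char.ofNat (122 - k)))

def solution_alt (data : String) : String :=
  pvPairs.foldl (fun d p =>
    PySem.Str.replace
      (PySem.Str.replace (PySem.Str.replace d (String.singleton p.1) "\x00")
        (String.singleton p.2) (String.singleton p.1))
      "\x00" (String.singleton p.2)) data

-- ===== PRECONDITION & SPEC =====
def Spec_solution (data : String) (out : String) : Prop := out = solution_alt data
instance (data : String) (out : String) : Decidable (Spec_solution data out) := by unfold Spec_solution; infer_instance

-- ===== CLAIM (what is proved, stated in full; the proofs are below) =====
def Claim_equal_solution : Prop := ∀ (data : String), Dom_solution data → Spec_solution data (solution data)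

-- ===== LEMMAS AND PROOFS =====
-- A's per-character transformation, extracted
def chA (i : Char) : Char :=
  if 'A' ≤ i ∧ i ≤ 'Z' then Char.ofNat ('A'.toNat + 'Z'.toNat - i.toNat)
  else if 'a' ≤ i ∧ i ≤ 'z' then Char.ofNat ('a'.toNat + 'z'.toNat - i.toNat)
  else i

theorem solution_foldl (l : List Char) (s : String) :
    (l.foldl (fun result i =>
      if 'A' ≤ i ∧ i ≤ 'Z' then result.push (Char.ofNat ('A'.toNat + 'Z'.toNat - i.toNat))
      else if 'a' ≤ i ∧ i ≤ 'z' then result.push (Char.ofNat ('a'.toNat + 'z'.toNat - i.toNat))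
      else result.push i) s).toList = s.toList ++ l.map chA := by
  induction l generalizing s with
  | nil => simp
  | cons c t ih =>
      have hstep : (if 'A' ≤ c ∧ c ≤ 'Z' then s.push (Char.ofNat ('A'.toNat + 'Z'.toNat - c.toNat))
          else if 'a' ≤ c ∧ c ≤ 'z' then s.push (Char.ofNat ('a'.toNat + 'z'.toNat - c.toNat))
          else s.push c) = s.push (chA c) := by
        unfold chA; split_ifs <;> rfl
      simp only [List.foldl, hstep, ih, List.map]
      simp

-- substituting a single character a by a single character b
def sw (a b c : Char) : Char := if c = a then b else c

theorem replace_go_single (a b : Char) (l : List Char) (fuel : Nat) (acc : List Char)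
    (h : l.length ≤ fuel) :
    PySem.Chars.replace.go [a] [b] fuel l acc = acc.reverse ++ l.map (sw a b) := by
  induction l generalizing fuel acc with
  | nil => cases fuel <;> simp [PySem.Chars.replace.go]
  | cons c t ih =>
      cases fuel with
      | zero => simp at h
      | succ f =>
          have ht : t.length ≤ f := by simpa using h
          by_cases hc : c = a
          · subst hc
            simp [PySem.Chars.replace.go, List.isPrefixOf, ih _ _ ht, sw]
          · simp [PySem.Chars.replace.go, List.isPrefixOf, hc, ih _ _ ht, sw]
            exact fun h => absurd h.symm hc

theorem replace_single (a b : Char) (l : List Char) :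
    PySem.Chars.replace l [a] [b] = l.map (sw a b) := by
  simp [PySem.Chars.replace, replace_go_single a b l l.length [] (le_refl _)]

-- one transposition pass, per character
def gPair (p : Char × Char) (c : Char) : Char := sw '\x00' p.2 (sw p.2 p.1 (sw p.1 '\x00' c))

theorem step_toList (d : String) (p : Char × Char) :
    (PySem.Str.replace
      (PySem.Str.replace (PySem.Str.replace d (String.singleton p.1) "\x00")
        (String.singleton p.2) (String.singleton p.1))
      "\x00" (String.singleton p.2)).toList = d.toList.map (gPair p) := by
  simp only [PySem.Str.toList_replace, String.toList_singleton]
  have h0 : ("\x00" : String).toList = ['\x00'] := rfl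
  rw [h0, replace_single, replace_single, replace_single]
  simp [gPair, List.map_map, Function.comp]

-- whole-string composition of the 26 passes, per character
def gAll (c : Char) : Char := pvPairs.foldl (fun x p => gPair p x) c

theorem foldl_passes (ps : List (Char × Char)) (d : String) :
    (ps.foldl (fun d p =>
      PySem.Str.replace
        (PySem.Str.replace (PySem.Str.replace d (String.singleton p.1) "\x00")
          (String.singleton p.2) (String.singleton p.1))
        "\x00" (String.singleton p.2)) d).toList
    = d.toList.map (fun c => ps.foldl (fun x p => gPair p x) c) := by
  induction ps generalizing d with
  | nil => simp
  | cons p t ih =>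
      simp only [List.foldl]
      rw [ih, step_toList, List.map_map]
      simp [Function.comp]

set_option maxRecDepth 10000 in
theorem chA_eq_gAll_range :
    (List.range 128).all (fun n => decide (n = 0) || (chA (Char.ofNat n) == gAll (Char.ofNat n))) = true := by
  decide

theorem chA_eq_gAll (c : Char) (h1 : 1 ≤ c.toNat) (h2 : c.toNat ≤ 127) : chA c = gAll c := by
  have hm : c.toNat ∈ List.range 128 := by simp; omega
  have := List.all_eq_true.mp chA_eq_gAll_range _ hm
  simp only [Bool.or_eq_true, decide_eq_true_eq, beq_iff_eq] at this
  rcases this with h | h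
  · omega
  · simpa [Char.ofNat_toNat] using h

-- ===== VERDICT (by name: the statement is the Claim_ definition above) =====
theorem solution_spec : Claim_equal_solution := by
  intro data hdom
  show solution data = solution_alt data
  apply String.ext
  unfold solution solution_alt
  rw [solution_foldl, foldl_passes]
  simp only [String.toList_empty, List.nil_append]
  apply List.map_congr_left
  intro c hc
  have hd : pvDomChar c = true := List.all_eq_true.mp hdom c hc
  simp only [pvDomChar, Bool.or_eq_true, Bool.and_eq_true, decide_eq_true_eq, beq_iff_eq] at hd
  exact chA_eq_gAll c (by omega) (by omega)
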